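-- pv_equiv track=rewrite | github.com/sutormin94/E_coli_DRIP-Seq_analysis | Return_reproducible_peaks.py | Find_rep_peaks
-- ===== SOURCE A (Python) =====
-- def Find_rep_peaks(genome_ar, thr):
--     peak=0
--     rep_peaks_ar=[]
--     for i in range(len(genome_ar)):
--         if genome_ar[i]<thr and peak==0: #We are not in peak.
--             continue
--         elif genome_ar[i]>=thr and peak==0: #We are at left peak border.
--             peak=1
--             current_peak=[i]
--             continue
--         elif genome_ar[i]>=thr and peak==1: #We are within a peak.
--             continue
--         elif genome_ar[i]<thr and peak==1: #We are at the right peak border.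
--             peak=0
--             current_peak.append(i)
--             rep_peaks_ar.append(current_peak)
--             continue
--     return rep_peaks_ar
-- ===== SOURCE B (Python) =====
-- def Find_rep_peaks(genome_ar, thr):
--     mask = [v >= thr for v in genome_ar]
--     prevs = [False] + mask[:-1]
--     starts = [i for i, (p, m) in enumerate(zip(prevs, mask)) if m and not p]
--     closes = [i for i, (p, m) in enumerate(zip(prevs, mask)) if p and not m]
--     return [[s, c] for s, c in zip(starts, closes)]
-- ===== Notes on version B (the rewrite author's own statement) =====
-- stated objective: alternative
-- what changed: Replaces A's single fused state-flag loop with a table-then-boundary-scan decomposition: build a boolean mask (v >= thr), scan adjacent (prev, cur) mask pairs for rising edges (starts) and falling edges (closes), and zip starts with closes (zip drops a trailing unclosed start, matching A).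
import Mathlib
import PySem

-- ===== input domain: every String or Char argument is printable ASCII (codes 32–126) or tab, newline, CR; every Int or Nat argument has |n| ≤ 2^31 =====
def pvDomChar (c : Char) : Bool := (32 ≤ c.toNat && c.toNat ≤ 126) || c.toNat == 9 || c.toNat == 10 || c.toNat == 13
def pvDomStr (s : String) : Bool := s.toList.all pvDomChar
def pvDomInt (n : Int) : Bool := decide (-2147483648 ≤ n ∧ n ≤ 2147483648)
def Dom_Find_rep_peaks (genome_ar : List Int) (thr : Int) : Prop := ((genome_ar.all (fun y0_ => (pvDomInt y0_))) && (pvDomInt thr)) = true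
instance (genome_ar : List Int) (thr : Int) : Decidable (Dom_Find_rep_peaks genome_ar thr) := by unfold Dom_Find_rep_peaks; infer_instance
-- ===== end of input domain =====

-- B replaces A's fused state-flag loop by a three-stage table decomposition (mask, edge
-- scans, zip of starts with closes); objective: alternative decomposition, same cost.

-- ===== PORT A =====
-- state = (peak flag, current_peak, rep_peaks_ar); one step of A's loop body, branches in order
def pvStepA (thr : Int) (st : Int × List Int × List (List Int)) (iv : Int × Int) :
    Int × List Int × List (List Int) :=
  let peak := st.1; let cur := st.2.1; let rep := st.2.2
  let i := iv.1; let v := iv.2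
  if v < thr ∧ peak = 0 then (peak, cur, rep)
  else if v ≥ thr ∧ peak = 0 then (1, [i], rep)
  else if v ≥ thr ∧ peak = 1 then (peak, cur, rep)
  else if v < thr ∧ peak = 1 then (0, cur ++ [i], rep ++ [cur ++ [i]])
  else (peak, cur, rep)

def Find_rep_peaks (genome_ar : List Int) (thr : Int) : List (List Int) :=
  ((PySem.List.enumerate genome_ar 0).foldl (pvStepA thr) (0, [], [])).2.2

-- ===== PORT B =====
def Find_rep_peaks_alt (genome_ar : List Int) (thr : Int) : List (List Int) :=
  let mask := genome_ar.map (fun v => decide (v ≥ thr))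
  let prevs := false :: mask.dropLast            -- [False] + mask[:-1]
  let pairs := PySem.List.enumerate (prevs.zip mask) 0
  let starts := (pairs.filter (fun x => x.2.2 && !x.2.1)).map (fun x => x.1)
  let closes := (pairs.filter (fun x => x.2.1 && !x.2.2)).map (fun x => x.1)
  (starts.zip closes).map (fun sc => [sc.1, sc.2])

-- ===== PRECONDITION & SPEC =====
def Spec_Find_rep_peaks (genome_ar : List Int) (thr : Int) (out : List (List Int)) : Prop := out = Find_rep_peaks_alt genome_ar thr
instance (genome_ar : List Int) (thr : Int) (out : List (List Int)) : Decidable (Spec_Find_rep_peaks genome_ar thr out) := by unfold Spec_Find_rep_peaks; infer_instance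

-- ===== CLAIM (what is proved, stated in full; the proofs are below) =====
def Claim_equal_Find_rep_peaks : Prop := ∀ (genome_ar : List Int) (thr : Int), Dom_Find_rep_peaks genome_ar thr → Spec_Find_rep_peaks genome_ar thr (Find_rep_peaks genome_ar thr)

-- ===== LEMMAS AND PROOFS =====

-- reference recursion: the peak intervals of l scanning from index i, currently in a peak
-- iff inPeak, with current start s
def pvRuns (thr i : Int) (inPeak : Bool) (s : Int) : List Int → List (List Int)
  | [] => []
  | v :: t =>
    if v ≥ thr then
      (if inPeak then pvRuns thr (i+1) true s t else pvRuns thr (i+1) true i t)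
    else
      (if inPeak then [s, i] :: pvRuns thr (i+1) false s t else pvRuns thr (i+1) false s t)

def pvStarts (thr i : Int) (p : Bool) : List Int → List Int
  | [] => []
  | v :: t => (if decide (v ≥ thr) && !p then [i] else []) ++ pvStarts thr (i+1) (decide (v ≥ thr)) t

def pvCloses (thr i : Int) (p : Bool) : List Int → List Int
  | [] => []
  | v :: t => (if p && !(decide (v ≥ thr)) then [i] else []) ++ pvCloses thr (i+1) (decide (v ≥ thr)) t

lemma foldA_runs (thr : Int) : ∀ (l : List Int) (i : Int) (R : List (List Int)),
    (∀ cur s, ((PySem.List.enumerate l i).foldl (pvStepA thr) (0, cur, R)).2.2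
        = R ++ pvRuns thr i false s l) ∧
    (∀ s, ((PySem.List.enumerate l i).foldl (pvStepA thr) (1, [s], R)).2.2
        = R ++ pvRuns thr i true s l) := by
  intro l
  induction l with
  | nil => intro i R; simp [PySem.List.enumerate_nil, pvRuns]
  | cons v t ih =>
    intro i R
    constructor
    · intro cur s
      by_cases h : v ≥ thr
      · simp only [PySem.List.enumerate_cons, List.foldl_cons, pvStepA, pvRuns]
        have hlt : ¬ (v < thr) := by omega
        simp only [hlt, h, if_pos, if_neg, false_and, and_true, if_true, if_false]
        simp [h, (ih (i+1) R).2 i]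
      · simp only [PySem.List.enumerate_cons, List.foldl_cons, pvStepA, pvRuns]
        have hlt : v < thr := by omega
        simp only [hlt, h, true_and, and_true, if_true, if_false, false_and]
        simp [h, (ih (i+1) R).1 cur s]
    · intro s
      by_cases h : v ≥ thr
      · simp only [PySem.List.enumerate_cons, List.foldl_cons, pvStepA, pvRuns]
        have hlt : ¬ (v < thr) := by omega
        simp only [hlt, h]
        simp [h, (ih (i+1) R).2 s, show (1:Int) ≠ 0 by decide]
      · simp only [PySem.List.enumerate_cons, List.foldl_cons, pvStepA, pvRuns]
        have hlt : v < thr := by omega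
        simp only [hlt, h]
        simp only [hlt, h, show ¬((1:Int) = 0) by decide, false_and, and_true,
          true_and, if_false, if_true, and_false, if_pos, not_false_eq_true]
        rw [(ih (i+1) (R ++ [[s] ++ [i]])).1 ([s] ++ [i]) s]
        simp
    
lemma zip_dropLast_cons {α : Type} : ∀ (xs : List α) (x : α),
    (x :: xs.dropLast).zip xs = (x :: xs).zip xs := by
  intro xs
  induction xs with
  | nil => intro x; rfl
  | cons y t ih =>
    intro x
    cases t with
    | nil => rfl
    | cons z t' =>
      rw [List.dropLast_cons₂, List.zip_cons_cons, ih y]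
      rfl

lemma filter_starts (thr : Int) : ∀ (l : List Int) (i : Int) (p : Bool),
    (((PySem.List.enumerate ((p :: l.map (fun v => decide (v ≥ thr))).zip
        (l.map (fun v => decide (v ≥ thr)))) i).filter
        (fun x => x.2.2 && !x.2.1)).map (fun x => x.1)) = pvStarts thr i p l := by
  intro l
  induction l with
  | nil => intro i p; simp [pvStarts, PySem.List.enumerate_nil]
  | cons v t ih =>
    intro i p
    simp only [List.map_cons, List.zip_cons_cons, PySem.List.enumerate_cons,
      List.filter_cons, pvStarts]
    by_cases h : (decide (v ≥ thr) && !p) = true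
    · simp [h, ih (i+1) (decide (v ≥ thr))]
    · simp [h, ih (i+1) (decide (v ≥ thr))]

lemma filter_closes (thr : Int) : ∀ (l : List Int) (i : Int) (p : Bool),
    (((PySem.List.enumerate ((p :: l.map (fun v => decide (v ≥ thr))).zip
        (l.map (fun v => decide (v ≥ thr)))) i).filter
        (fun x => x.2.1 && !x.2.2)).map (fun x => x.1)) = pvCloses thr i p l := by
  intro l
  induction l with
  | nil => intro i p; simp [pvCloses, PySem.List.enumerate_nil]
  | cons v t ih =>
    intro i p
    simp only [List.map_cons, List.zip_cons_cons, PySem.List.enumerate_cons,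
      List.filter_cons, pvCloses]
    by_cases h : (p && !(decide (v ≥ thr))) = true
    · simp [h, ih (i+1) (decide (v ≥ thr))]
    · simp [h, ih (i+1) (decide (v ≥ thr))]

lemma zip_runs (thr : Int) : ∀ (l : List Int) (i : Int),
    (∀ s, ((pvStarts thr i false l).zip (pvCloses thr i false l)).map
        (fun sc => [sc.1, sc.2]) = pvRuns thr i false s l) ∧
    (∀ s, ((s :: pvStarts thr i true l).zip (pvCloses thr i true l)).map
        (fun sc => [sc.1, sc.2]) = pvRuns thr i true s l) := by
  intro l
  induction l with
  | nil => intro i; simp [pvStarts, pvCloses, pvRuns]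
  | cons v t ih =>
    intro i
    constructor
    · intro s
      by_cases h : v ≥ thr
      · simp only [pvStarts, pvCloses, pvRuns, h, decide_true, if_pos, if_neg]
        simpa using (ih (i+1)).2 i
      · simp only [pvStarts, pvCloses, pvRuns, h, decide_false]
        simpa [h] using (ih (i+1)).1 s
    · intro s
      by_cases h : v ≥ thr
      · simp only [pvStarts, pvCloses, pvRuns, h, decide_true]
        simpa using (ih (i+1)).2 s
      · simp only [pvStarts, pvCloses, pvRuns, h, decide_false]
        simpa [h] using (ih (i+1)).1 s

-- ===== VERDICT (by name: the statement is the Claim_ definition above) =====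
theorem Find_rep_peaks_spec : Claim_equal_Find_rep_peaks := by
  intro g thr _
  unfold Spec_Find_rep_peaks Find_rep_peaks Find_rep_peaks_alt
  dsimp only
  have hA := ((foldA_runs thr g 0 []).1 [] 0)
  simp only [List.nil_append] at hA
  rw [hA]
  rw [zip_dropLast_cons (g.map (fun v => decide (v ≥ thr))) false]
  rw [filter_starts thr g 0 false, filter_closes thr g 0 false]
  exact ((zip_runs thr g 0).1 0).symm
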